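-- pv_equiv track=rewrite | github.com/mhk51/EECE455_Project | 455test1.py | crackaffinecipher
-- ===== SOURCE A (Python) =====
-- def crackaffinecipher(letter1,letter2):
--     lst = [-1,-1]
--     x = ord(letter1) - 97
--     y = ord(letter2) - 97
--     # x = (4a + b)%26
--     # y = (19a + b)%26
--     # first condition (y-x) = 15a%26
--     a = 0
--     while (True):
--         if ((y-x)%26 == (15*a)%26):
--             break
--         else:
--             a = a + 1
--     # second condition x = (4a + b)%26
--     b = 0
--     while (True):
--         if (x%26 == (4*a + b)%26):
--             break
--         else:
--             b = b + 1
--     lst[0] = a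
--     lst[1] = b
--     return lst
-- ===== SOURCE B (Python) =====
-- def crackaffinecipher(letter1, letter2):
--     # closed form: 7 is the inverse of 15 mod 26
--     x = ord(letter1) - 97
--     y = ord(letter2) - 97
--     a = (7 * (y - x)) % 26
--     b = (x - 4 * a) % 26
--     return [a, b]
-- ===== Notes on version B (the rewrite author's own statement) =====
-- stated objective: faster
-- what changed: Replaced the two linear search loops by the closed-form modular-inverse solution a=(7*(y-x))%26, b=(x-4*a)%26 (7 is the inverse of 15 mod 26).
import Mathlib
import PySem

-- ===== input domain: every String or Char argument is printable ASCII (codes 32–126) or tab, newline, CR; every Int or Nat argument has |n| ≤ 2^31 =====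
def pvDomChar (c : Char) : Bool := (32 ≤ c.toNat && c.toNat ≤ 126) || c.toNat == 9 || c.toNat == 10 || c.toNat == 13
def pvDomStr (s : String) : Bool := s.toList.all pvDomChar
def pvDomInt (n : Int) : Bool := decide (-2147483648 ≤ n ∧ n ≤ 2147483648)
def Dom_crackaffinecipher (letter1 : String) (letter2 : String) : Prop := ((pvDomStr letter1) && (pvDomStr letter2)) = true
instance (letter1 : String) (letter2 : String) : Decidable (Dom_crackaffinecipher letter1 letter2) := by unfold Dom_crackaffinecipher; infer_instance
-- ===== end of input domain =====

-- B replaces A's two search loops by the closed-form modular-inverse solution (O(1), no loops).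

-- ord(s) for a 1-character string (Pre_ guarantees length 1, where this is exact)
def pvOrd (s : String) : Int :=
  match s.toList with
  | c :: _ => (c.toNat : Int)
  | [] => 0

-- ===== PORT A =====
-- A's first while loop: smallest a with (y-x)%26 == (15*a)%26; d = y-x is loop-invariant.
-- The fuel (26) only makes the loop total: the smallest solution is < 26, so the break fires within the fuel.
def pvLoopA (d : Int) (a : Int) : Nat → Int
  | 0 => a
  | f + 1 => if PySem.Int.mod d 26 = PySem.Int.mod (15 * a) 26 then a else pvLoopA d (a + 1) f

-- A's second while loop: smallest b with x%26 == (4*a+b)%26; same fuel remark.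
def pvLoopB (x a : Int) (b : Int) : Nat → Int
  | 0 => b
  | f + 1 => if PySem.Int.mod x 26 = PySem.Int.mod (4 * a + b) 26 then b else pvLoopB x a (b + 1) f

def crackaffinecipher (letter1 : String) (letter2 : String) : List Int :=
  let x := pvOrd letter1 - 97
  let y := pvOrd letter2 - 97
  let a := pvLoopA (y - x) 0 26
  let b := pvLoopB x a 0 26
  [a, b]

-- ===== PORT B =====
def crackaffinecipher_alt (letter1 : String) (letter2 : String) : List Int :=
  let x := pvOrd letter1 - 97
  let y := pvOrd letter2 - 97
  let a := PySem.Int.mod (7 * (y - x)) 26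
  let b := PySem.Int.mod (x - 4 * a) 26
  [a, b]

-- ===== PRECONDITION & SPEC =====
-- Pre_ excludes exactly the inputs where Python's ord raises TypeError (strings not of length 1).
def Pre_crackaffinecipher (letter1 : String) (letter2 : String) : Prop :=
  letter1.toList.length = 1 ∧ letter2.toList.length = 1
instance (letter1 : String) (letter2 : String) : Decidable (Pre_crackaffinecipher letter1 letter2) := by unfold Pre_crackaffinecipher; infer_instance
def pvWitness_crackaffinecipher : String × String := ("a", "b")

def Spec_crackaffinecipher (letter1 : String) (letter2 : String) (out : List Int) : Prop := out = crackaffinecipher_alt letter1 letter2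
instance (letter1 : String) (letter2 : String) (out : List Int) : Decidable (Spec_crackaffinecipher letter1 letter2 out) := by unfold Spec_crackaffinecipher; infer_instance

-- ===== CLAIM (what is proved, stated in full; the proofs are below) =====
def Claim_equal_crackaffinecipher : Prop := ∀ (letter1 : String) (letter2 : String), Dom_crackaffinecipher letter1 letter2 → Pre_crackaffinecipher letter1 letter2 → Spec_crackaffinecipher letter1 letter2 (crackaffinecipher letter1 letter2)

-- ===== LEMMAS AND PROOFS =====

-- the first loop only looks at d through d%26
lemma pvLoopA_reduce (d : Int) : ∀ (fuel : Nat) (a : Int), pvLoopA d a fuel = pvLoopA (PySem.Int.mod d 26) a fuel := by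
  intro fuel
  induction fuel with
  | zero => intro a; rfl
  | succ f ih =>
    intro a
    have hc : (PySem.Int.mod d 26 = PySem.Int.mod (15 * a) 26) ↔
        (PySem.Int.mod (PySem.Int.mod d 26) 26 = PySem.Int.mod (15 * a) 26) := by
      simp [PySem.Int.mod_eq_emod_of_pos (by norm_num : (0:Int) < 26)]
    simp only [pvLoopA]
    by_cases h : PySem.Int.mod d 26 = PySem.Int.mod (15 * a) 26
    · rw [if_pos h, if_pos (hc.mp h)]
    · rw [if_neg h, if_neg (fun h' => h (hc.mpr h')), ih]

-- for residues t in [0,26) the loop finds exactly (7*t)%26 within fuel 26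
lemma pvLoopA_fin : ∀ t : Fin 26, pvLoopA ((t.val : Int)) 0 26 = PySem.Int.mod (7 * (t.val : Int)) 26 := by decide

lemma pvLoopA_closed (d : Int) : pvLoopA d 0 26 = PySem.Int.mod (7 * d) 26 := by
  have h26 : (0:Int) < 26 := by norm_num
  have hmod := PySem.Int.mod_eq_emod_of_pos (a := d) h26
  have hlo : 0 ≤ PySem.Int.mod d 26 := PySem.Int.mod_nonneg _ h26
  have hhi : PySem.Int.mod d 26 < 26 := PySem.Int.mod_lt _ h26
  rw [pvLoopA_reduce]
  have ht : ((PySem.Int.mod d 26).toNat : Int) = PySem.Int.mod d 26 := Int.toNat_of_nonneg hlo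
  have hfin := pvLoopA_fin ⟨(PySem.Int.mod d 26).toNat, by omega⟩
  simp only [ht] at hfin
  rw [hfin]
  simp only [PySem.Int.mod_eq_emod_of_pos h26] at *
  omega

-- the second loop only looks at (x, a) through (x - 4*a)%26
lemma pvLoopB_reduce (x a : Int) : ∀ (fuel : Nat) (b : Int), pvLoopB x a b fuel = pvLoopB (PySem.Int.mod (x - 4 * a) 26) 0 b fuel := by
  intro fuel
  induction fuel with
  | zero => intro b; rfl
  | succ f ih =>
    intro b
    have hc : (PySem.Int.mod x 26 = PySem.Int.mod (4 * a + b) 26) ↔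
        (PySem.Int.mod (PySem.Int.mod (x - 4 * a) 26) 26 = PySem.Int.mod (4 * 0 + b) 26) := by
      simp only [PySem.Int.mod_eq_emod_of_pos (by norm_num : (0:Int) < 26)]
      omega
    simp only [pvLoopB]
    by_cases h : PySem.Int.mod x 26 = PySem.Int.mod (4 * a + b) 26
    · rw [if_pos h, if_pos (hc.mp h)]
    · rw [if_neg h, if_neg (fun h' => h (hc.mpr h')), ih]

-- for residues t in [0,26) the second loop finds exactly t within fuel 26
lemma pvLoopB_fin : ∀ t : Fin 26, pvLoopB ((t.val : Int)) 0 0 26 = (t.val : Int) := by decide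

lemma pvLoopB_closed (x a : Int) : pvLoopB x a 0 26 = PySem.Int.mod (x - 4 * a) 26 := by
  have h26 : (0:Int) < 26 := by norm_num
  have hlo : 0 ≤ PySem.Int.mod (x - 4 * a) 26 := PySem.Int.mod_nonneg _ h26
  have hhi : PySem.Int.mod (x - 4 * a) 26 < 26 := PySem.Int.mod_lt _ h26
  rw [pvLoopB_reduce]
  have ht : ((PySem.Int.mod (x - 4 * a) 26).toNat : Int) = PySem.Int.mod (x - 4 * a) 26 := Int.toNat_of_nonneg hlo
  have hfin := pvLoopB_fin ⟨(PySem.Int.mod (x - 4 * a) 26).toNat, by omega⟩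
  simp only [ht] at hfin
  rw [hfin]

-- ===== VERDICT (by name: the statement is the Claim_ definition above) =====
theorem crackaffinecipher_spec : Claim_equal_crackaffinecipher := by
  intro letter1 letter2 _ _
  unfold Spec_crackaffinecipher crackaffinecipher crackaffinecipher_alt
  simp only [pvLoopA_closed, pvLoopB_closed]
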